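-- pv_equiv track=rewrite | github.com/strongbugman/apiman | apiman/flask.py | _covert_path_rule
-- ===== SOURCE A (Python) =====
-- def _covert_path_rule(path: str) -> str:
--     # covert flask variable rules, eg "/path/<int:id>" to "/path/{id}"
--     _subs = []
--     for _sub in path.split("/"):
--         if _sub.startswith("<") and _sub.endswith(">"):
--             _subs.append(f"{{{_sub[1:-1].split(':')[-1]}}}")
--         else:
--             _subs.append(_sub)
--
--     return "/".join(_subs)
-- ===== SOURCE B (Python) =====
-- def _covert_path_rule(path: str) -> str:
--     # single left-to-right scan over the string: no split/join of segment lists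
--     out = []
--     i = 0
--     n = len(path)
--     while i < n:
--         j = path.find("/", i)
--         end = n if j == -1 else j          # current segment is path[i:end]
--         if path[i] == "<" and end - i >= 2 and path[end - 1] == ">":
--             name = []
--             for ch in path[i + 1:end - 1]:
--                 if ch == ":":
--                     name = []              # restart after every ':' -> keeps the part after the last ':'
--                 else:
--                     name.append(ch)
--             out.append("{" + "".join(name) + "}")
--         else:
--             out.append(path[i:end])
--         if end < n:
--             out.append("/")
--         i = end + 1
--     return "".join(out)
-- ===== Notes on version B (the rewrite author's own statement) =====
-- stated objective: alternative
-- what changed: A splits the path into a list of segments, transforms each bracketed segment, and joins the list back together; B makes a single left-to-right scan over the string, emitting chunks as it goes and extracting the parameter name after the last colon with one forward pass instead of an inner split.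
import Mathlib
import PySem

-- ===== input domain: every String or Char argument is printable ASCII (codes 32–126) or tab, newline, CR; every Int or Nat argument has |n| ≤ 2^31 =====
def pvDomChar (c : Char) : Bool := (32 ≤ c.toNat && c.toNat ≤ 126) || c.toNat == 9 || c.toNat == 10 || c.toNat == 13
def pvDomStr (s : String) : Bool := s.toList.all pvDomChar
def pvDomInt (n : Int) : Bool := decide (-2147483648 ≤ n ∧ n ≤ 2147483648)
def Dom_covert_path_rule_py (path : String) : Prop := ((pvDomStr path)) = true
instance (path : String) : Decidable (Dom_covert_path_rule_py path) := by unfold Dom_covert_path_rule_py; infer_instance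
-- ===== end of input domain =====

-- B replaces A's split-into-segments / transform / join pipeline by a single left-to-right
-- scan of the string (objective: alternative, same cost).

-- ===== PORT A =====
-- one segment's transformation: the body of A's for-loop
def pvASeg (sub : List Char) : List Char :=
  if PySem.Chars.startswith sub ['<'] && PySem.Chars.endswith sub ['>'] then
    -- f"{{{_sub[1:-1].split(':')[-1]}}}"; splitOn never returns [], so pyGet? … (-1) is always some and .getD [] is never used
    '{' :: (PySem.List.pyGet? (PySem.Chars.splitOn (PySem.List.slice sub (some 1) (some (-1))) [':']) (-1)).getD [] ++ ['}']
  else sub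

def covert_path_rule_py (path : String) : String :=
  let subs := (PySem.Chars.splitOn path.toList ['/']).foldl (fun acc sub => acc ++ [pvASeg sub]) []
  String.mk (PySem.Chars.join ['/'] subs)

-- ===== PORT B =====
def covert_path_rule_py_alt_scan (l : List Char) : List Char :=
  match l with
  | [] => []
  | c :: cs =>
    -- path[i:end]: the chars up to the next '/'
    let seg := (c :: cs).takeWhile (fun x => x ≠ '/')
    let chunk :=
      if c = '<' ∧ 2 ≤ seg.length ∧ seg.getLast? = some '>' then
        -- the inner for-loop over path[i+1:end-1], restarting name at every ':'
        '{' :: ((seg.drop 1).dropLast.foldl (fun nm ch => if ch = ':' then [] else nm ++ [ch]) []) ++ ['}']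
      else seg
    match h2 : (c :: cs).drop seg.length with
    | [] => chunk
    | _ :: r => chunk ++ '/' :: covert_path_rule_py_alt_scan r
  termination_by l.length
  decreasing_by
    have := congrArg List.length h2
    simp [List.length_drop] at this
    simp only [List.length_cons]
    omega

def covert_path_rule_py_alt (path : String) : String :=
  String.mk (covert_path_rule_py_alt_scan path.toList)

-- ===== PRECONDITION & SPEC =====
def Spec_covert_path_rule_py (path : String) (out : String) : Prop := out = covert_path_rule_py_alt path
instance (path : String) (out : String) : Decidable (Spec_covert_path_rule_py path out) := by unfold Spec_covert_path_rule_py; infer_instance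

-- ===== CLAIM (what is proved, stated in full; the proofs are below) =====
def Claim_equal_covert_path_rule_py : Prop := ∀ (path : String), Dom_covert_path_rule_py path → Spec_covert_path_rule_py path (covert_path_rule_py path)

-- ===== LEMMAS AND PROOFS =====

-- reference splitter on a single-char separator
def pvGlueL (x : List Char) : List (List Char) → List (List Char)
  | [] => [x]
  | y :: ys => (x ++ y) :: ys

def pvSplit (sep : Char) : List Char → List (List Char)
  | [] => [[]]
  | c :: r => if c = sep then [] :: pvSplit sep r else pvGlueL [c] (pvSplit sep r)

theorem pvSplit_ne_nil (sep : Char) (l : List Char) : pvSplit sep l ≠ [] := by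
  induction l with
  | nil => simp [pvSplit]
  | cons c r ih =>
    simp only [pvSplit]
    split
    · simp
    · cases h : pvSplit sep r with
      | nil => exact absurd h ih
      | cons y ys => simp [pvGlueL]

theorem pvSplitOn_go_eq (sep : Char) (fuel : Nat) (l cur : List Char) (acc : List (List Char))
    (h : l.length < fuel) :
    PySem.Chars.splitOn.go [sep] fuel l cur acc =
      acc.reverse ++ pvGlueL cur.reverse (pvSplit sep l) := by
  induction fuel generalizing l cur acc with
  | zero => omega
  | succ fuel ih =>
    cases l with
    | nil => simp [PySem.Chars.splitOn.go, pvSplit, pvGlueL]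
    | cons c r =>
      by_cases hc : c = sep
      · subst hc
        rw [show PySem.Chars.splitOn.go [c] (fuel+1) (c :: r) cur acc
              = PySem.Chars.splitOn.go [c] fuel r [] (cur.reverse :: acc) from by
            simp [PySem.Chars.splitOn.go, List.isPrefixOf]]
        rw [ih r [] (cur.reverse :: acc) (by simpa using Nat.lt_of_succ_lt_succ (by simpa using h))]
        simp [pvSplit, pvGlueL]
        cases hs : pvSplit c r with
        | nil => exact absurd hs (pvSplit_ne_nil c r)
        | cons y ys => simp [pvGlueL]
      · rw [show PySem.Chars.splitOn.go [sep] (fuel+1) (c :: r) cur acc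
              = PySem.Chars.splitOn.go [sep] fuel r (c :: cur) acc from by
            simp [PySem.Chars.splitOn.go, List.isPrefixOf, hc]
            intro hcc; exact absurd hcc.symm hc]
        rw [ih r (c :: cur) acc (by simpa using Nat.lt_of_succ_lt_succ (by simpa using h))]
        simp only [pvSplit, if_neg hc]
        cases hs : pvSplit sep r with
        | nil => exact absurd hs (pvSplit_ne_nil sep r)
        | cons y ys => simp [pvGlueL]

theorem pvSplitOn_eq (sep : Char) (l : List Char) :
    PySem.Chars.splitOn l [sep] = pvSplit sep l := by
  rw [PySem.Chars.splitOn, pvSplitOn_go_eq sep (l.length + 1) l [] [] (by omega)]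
  cases hs : pvSplit sep l with
  | nil => exact absurd hs (pvSplit_ne_nil sep l)
  | cons y ys => simp [pvGlueL]

-- A's for-loop builds the map
theorem pvFoldl_map (xs : List (List Char)) (acc : List (List Char)) :
    xs.foldl (fun acc sub => acc ++ [pvASeg sub]) acc = acc ++ xs.map pvASeg := by
  induction xs generalizing acc with
  | nil => simp
  | cons x xs ih => simp [ih]

-- split-head lemmas
theorem pvSplit_no_sep (l : List Char) (h : l.dropWhile (fun x => x ≠ '/') = []) :
    pvSplit '/' l = [l] := by
  induction l with
  | nil => simp [pvSplit]
  | cons c cs ih =>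
    simp only [List.dropWhile] at h
    by_cases hc : c = '/'
    · simp [hc] at h
    · simp only [pvSplit, if_neg hc]
      have h' : cs.dropWhile (fun x => x ≠ '/') = [] := by simpa [hc] using h
      rw [ih h']
      have hts : cs.takeWhile (fun x => x ≠ '/') = cs := by
        rw [List.takeWhile_eq_self_iff]
        intro x hx
        have := List.dropWhile_eq_nil_iff.mp h' x hx
        simpa using this
      simp [pvGlueL, List.takeWhile, hc, hts]

theorem pvSplit_cons_sep (l : List Char) (d : Char) (r : List Char)
    (h : l.dropWhile (fun x => x ≠ '/') = d :: r) :
    pvSplit '/' l = l.takeWhile (fun x => x ≠ '/') :: pvSplit '/' r := by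
  induction l with
  | nil => simp [List.dropWhile] at h
  | cons c cs ih =>
    by_cases hc : c = '/'
    · subst hc
      simp only [List.dropWhile, decide_not] at h
      simp at h
      simp [pvSplit, List.takeWhile, h.2]
    · simp only [List.dropWhile, decide_not] at h
      simp [hc] at h
      simp only [pvSplit, if_neg hc]
      rw [ih (by simpa [hc] using h)]
      simp [pvGlueL, List.takeWhile, hc]

-- drop past the takeWhile prefix is dropWhile
theorem pvDrop_takeWhile (l : List Char) (p : Char → Bool) :
    l.drop (l.takeWhile p).length = l.dropWhile p := by
  induction l with
  | nil => rfl
  | cons c cs ih =>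
    by_cases h : p c
    · simp [List.takeWhile, List.dropWhile, h, ih]
    · simp [List.takeWhile, List.dropWhile, h]

-- _sub[1:-1]
theorem pvSlice_inner (sub : List Char) (h : 2 ≤ sub.length) :
    PySem.List.slice sub (some 1) (some (-1)) = (sub.drop 1).dropLast := by
  simp [PySem.List.slice]
  rw [Nat.min_eq_left (by omega), List.dropLast_eq_take, List.drop_one]
  congr 1
  simp

-- xs[-1] of a list with known last element
theorem pvPyGet_last (ys : List (List Char)) (x : List Char) :
    PySem.List.pyGet? (ys ++ [x]) (-1) = some x := by
  simp [PySem.List.pyGet?, PySem.List.pyIdx?]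

-- the suffix of cs after its last ':' (cs itself if there is none)
def pvTail (cs : List Char) : List Char := (cs.reverse.takeWhile (fun x => x ≠ ':')).reverse

def pvName (cs : List Char) : List Char := if ':' ∈ cs then pvTail cs else cs

theorem pvTakeWhile_append_mem (xs ys : List Char) (h : ':' ∈ xs) :
    (xs ++ ys).takeWhile (fun x => x ≠ ':') = xs.takeWhile (fun x => x ≠ ':') := by
  induction xs with
  | nil => simp at h
  | cons a as ih =>
    by_cases ha : a = ':'
    · simp [List.takeWhile, ha]
    · have hmem : ':' ∈ as := by
        rcases List.mem_cons.mp h with h1 | h1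
        · exact absurd h1.symm ha
        · exact h1
      rw [List.cons_append]
      simp only [List.takeWhile_cons]
      rw [ih hmem]

theorem pvTail_cons_mem (c : Char) (r : List Char) (h : ':' ∈ r) : pvTail (c :: r) = pvTail r := by
  unfold pvTail
  rw [List.reverse_cons, pvTakeWhile_append_mem r.reverse [c] (List.mem_reverse.mpr h)]

theorem pvTail_colon (r : List Char) (h : ':' ∉ r) : pvTail (':' :: r) = r := by
  unfold pvTail
  rw [List.reverse_cons, List.takeWhile_append]
  rw [List.takeWhile_eq_self_iff.mpr ?_]
  · simp
  · intro x hx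
    simp only [List.mem_reverse] at hx
    simp
    rintro rfl
    exact h hx

-- the inner for-loop of B computes the part after the last ':'
theorem pvFold_name (cs : List Char) (acc : List Char) :
    cs.foldl (fun nm ch => if ch = ':' then [] else nm ++ [ch]) acc =
      if ':' ∈ cs then pvTail cs else acc ++ cs := by
  induction cs generalizing acc with
  | nil => simp
  | cons c r ih =>
    by_cases hc : c = ':'
    · subst hc
      simp only [List.foldl, if_pos rfl, ih ([] : List Char), List.mem_cons, true_or, if_true]
      by_cases hr : ':' ∈ r
      · rw [if_pos hr, pvTail_cons_mem ':' r hr]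
      · rw [if_neg hr, pvTail_colon r hr]
        simp
    · simp only [List.foldl, if_neg hc, ih (acc ++ [c])]
      have hmem : (':' ∈ c :: r) ↔ (':' ∈ r) := by simp [List.mem_cons, Ne.symm hc, eq_comm, hc]
      by_cases hr : ':' ∈ r
      · rw [if_pos hr, if_pos (hmem.mpr hr), pvTail_cons_mem c r hr]
      · rw [if_neg hr, if_neg (fun h => hr (hmem.mp h))]
        simp

-- the last piece of split(':') is the part after the last ':'
theorem pvSplit_colon_last (cs : List Char) :
    ∃ ys, pvSplit ':' cs = ys ++ [pvName cs] ∧ ((':' ∈ cs) ↔ ys ≠ []) := by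
  induction cs with
  | nil => exact ⟨[], by simp [pvSplit, pvName]⟩
  | cons c r ih =>
    obtain ⟨ys, hys, hmem⟩ := ih
    by_cases hc : c = ':'
    · subst hc
      refine ⟨[] :: ys, ?_, by simp⟩
      simp only [pvSplit, if_pos rfl, hys]
      have : pvName (':' :: r) = pvName r := by
        unfold pvName
        by_cases hr : ':' ∈ r
        · rw [if_pos hr, if_pos (by simp), pvTail_cons_mem ':' r hr]
        · rw [if_neg hr, if_pos (by simp), pvTail_colon r hr]
      rw [this]
      simp
    · by_cases hr : ':' ∈ r
      · obtain ⟨z, zs, rfl⟩ : ∃ z zs, ys = z :: zs := by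
          cases ys with
          | nil => exact absurd rfl (hmem.mp hr)
          | cons z zs => exact ⟨z, zs, rfl⟩
        refine ⟨(c :: z) :: zs, ?_, by simp [List.mem_cons, hr]⟩
        simp only [pvSplit, if_neg hc, hys, pvGlueL]
        have : pvName (c :: r) = pvName r := by
          unfold pvName
          rw [if_pos hr, if_pos (by simp [hr]), pvTail_cons_mem c r hr]
        rw [this]
        simp [pvGlueL]
      · have hys0 : ys = [] := by by_contra hne; exact hr (hmem.mpr hne)
        subst hys0
        refine ⟨[], ?_, by simp [hc, Ne.symm, hr, eq_comm]⟩
        simp only [pvSplit, if_neg hc, hys, pvGlueL]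
        have h1 : pvName r = r := by unfold pvName; rw [if_neg hr]
        have h2 : pvName (c :: r) = c :: r := by
          unfold pvName
          rw [if_neg (by simp [hr]; exact fun h => absurd h.symm hc)]
        simp [h1, h2, pvGlueL]

-- the two per-segment transformations agree
theorem pvChunk_eq (c : Char) (cs : List Char) :
    (let seg := (c :: cs).takeWhile (fun x => x ≠ '/')
     if c = '<' ∧ 2 ≤ seg.length ∧ seg.getLast? = some '>' then
       '{' :: ((seg.drop 1).dropLast.foldl (fun nm ch => if ch = ':' then [] else nm ++ [ch]) []) ++ ['}']
     else seg) = pvASeg ((c :: cs).takeWhile (fun x => x ≠ '/')) := by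
  simp only []
  set seg := (c :: cs).takeWhile (fun x => x ≠ '/') with hseg
  unfold pvASeg
  by_cases hc : c = '/'
  · have hseg0 : seg = [] := by simp [hseg, List.takeWhile_cons, hc]
    rw [hseg0]
    rw [if_neg (by rintro ⟨rfl, -⟩; exact absurd hc (by decide)), if_neg (by simp [PySem.Chars.startswith_iff])]
  · have hcons : seg = c :: cs.takeWhile (fun x => x ≠ '/') := by
      simp [hseg, List.takeWhile_cons, hc]
    have hsw : PySem.Chars.startswith seg ['<'] = true ↔ c = '<' := by
      rw [PySem.Chars.startswith_iff, hcons]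
      constructor
      · intro h; exact ((List.cons_prefix_cons.mp h).1).symm
      · rintro rfl; exact List.cons_prefix_cons.mpr ⟨rfl, List.nil_prefix⟩
    have hew : PySem.Chars.endswith seg ['>'] = true ↔ seg.getLast? = some '>' := by
      rw [PySem.Chars.endswith_iff, List.getLast?_eq_some_iff]
      constructor
      · rintro ⟨t, ht⟩; exact ⟨t, ht.symm⟩
      · rintro ⟨t, ht⟩; exact ⟨t, ht.symm⟩
    have hlen : c = '<' → seg.getLast? = some '>' → 2 ≤ seg.length := by
      intro h1 hl
      rw [hcons] at hl ⊢
      cases htw : cs.takeWhile (fun x => x ≠ '/') with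
      | nil =>
        rw [htw] at hl
        simp at hl
        rw [h1] at hl
        exact absurd hl (by decide)
      | cons y ys => simp
    by_cases hcond : c = '<' ∧ 2 ≤ seg.length ∧ seg.getLast? = some '>'
    · obtain ⟨h1, h2, h3⟩ := hcond
      rw [if_pos ⟨h1, h2, h3⟩, if_pos (by rw [Bool.and_eq_true, hsw, hew]; exact ⟨h1, h3⟩)]
      rw [pvSlice_inner seg h2]
      obtain ⟨ys, hys, -⟩ := pvSplit_colon_last ((seg.drop 1).dropLast)
      rw [pvSplitOn_eq, hys, pvPyGet_last, pvFold_name]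
      simp [pvName]
    · rw [if_neg hcond, if_neg ?_]
      rw [Bool.and_eq_true, hsw, hew]
      rintro ⟨h1, h3⟩
      exact hcond ⟨h1, hlen h1 h3, h3⟩

-- B's scan equals join ∘ map ∘ split
theorem pvScan_eq (l : List Char) :
    covert_path_rule_py_alt_scan l = PySem.Chars.join ['/'] ((pvSplit '/' l).map pvASeg) := by
  induction l using covert_path_rule_py_alt_scan.induct with
  | case1 =>
    rw [covert_path_rule_py_alt_scan]
    simp [pvSplit, PySem.Chars.join_singleton]
    rw [pvASeg, if_neg (by simp [PySem.Chars.startswith_iff])]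
  | case2 c cs seg h2 =>
    have hdw : (c :: cs).dropWhile (fun x => x ≠ '/') = [] := by
      rw [← pvDrop_takeWhile]; exact h2
    have hwhole : (c :: cs).takeWhile (fun x => x ≠ '/') = c :: cs := by
      rw [List.takeWhile_eq_self_iff]
      exact List.dropWhile_eq_nil_iff.mp hdw
    rw [pvSplit_no_sep _ hdw, List.map_singleton, PySem.Chars.join_singleton]
    rw [covert_path_rule_py_alt_scan]
    split
    · rw [pvChunk_eq, hwhole]
    · rename_i heq
      rw [h2] at heq
      exact absurd heq (by simp)
  | case3 c cs seg head r h2 ih =>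
    have hdw : (c :: cs).dropWhile (fun x => x ≠ '/') = head :: r := by
      rw [← pvDrop_takeWhile]; exact h2
    rw [pvSplit_cons_sep _ head r hdw, List.map_cons]
    cases hz : (pvSplit '/' r).map pvASeg with
    | nil => exact absurd (List.map_eq_nil_iff.mp hz) (pvSplit_ne_nil '/' r)
    | cons z zs =>
      rw [PySem.Chars.join_cons_cons]
      rw [covert_path_rule_py_alt_scan]
      split
      · rename_i heq
        rw [h2] at heq
        exact absurd heq (by simp)
      · rename_i head' r' heq
        rw [h2] at heq
        cases heq
        rw [ih, pvChunk_eq, hz]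
        simp

theorem covert_path_rule_py_spec : Claim_equal_covert_path_rule_py := by
  intro path _
  unfold Spec_covert_path_rule_py covert_path_rule_py covert_path_rule_py_alt
  rw [pvScan_eq, pvSplitOn_eq, pvFoldl_map]
  simp
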